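-- pv_equiv track=rewrite | github.com/msk1039/Aiml-lab-mock | kartik/program03_dfs_game_map.py | dfs_walk
-- ===== SOURCE A (Python) =====
-- world = {
--     "Entrance": ["Hall", "Kitchen"],
--     "Hall": ["Armory", "Garden"],
--     "Kitchen": ["Pantry"],
--     "Pantry": [],
--     "Armory": ["Boss"],
--     "Garden": ["Boss"],
--     "Boss": []
-- }
--
-- def dfs_walk(start):
--     stack = [(start, [start])]
--     visited = []
--     seen = set()
--     while stack:
--         node, path = stack.pop()
--         if node in seen:
--             continue
--         seen.add(node)
--         visited.append((node, list(path)))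
--         for nxt in reversed(world.get(node, [])):
--             stack.append((nxt, path + [nxt]))
--     return visited
-- ===== SOURCE B (Python) =====
-- world = {
--     "Entrance": ["Hall", "Kitchen"],
--     "Hall": ["Armory", "Garden"],
--     "Kitchen": ["Pantry"],
--     "Pantry": [],
--     "Armory": ["Boss"],
--     "Garden": ["Boss"],
--     "Boss": []
-- }
--
-- def dfs_walk(start):
--     visited = []
--     seen = set()
--
--     def visit(node, path):
--         if node in seen:
--             return
--         seen.add(node)
--         visited.append((node, list(path)))
--         for nxt in world.get(node, []):
--             visit(nxt, path + [nxt])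
--
--     visit(start, [start])
--     return visited
-- ===== Notes on version B (the rewrite author's own statement) =====
-- stated objective: simpler
-- what changed: Replaced the explicit-stack iterative DFS (pop, reversed-neighbor pushes, leftover stale stack entries skipped via seen) with a plain recursive visit(node, path) helper iterating neighbors in forward order.
import Mathlib
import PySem

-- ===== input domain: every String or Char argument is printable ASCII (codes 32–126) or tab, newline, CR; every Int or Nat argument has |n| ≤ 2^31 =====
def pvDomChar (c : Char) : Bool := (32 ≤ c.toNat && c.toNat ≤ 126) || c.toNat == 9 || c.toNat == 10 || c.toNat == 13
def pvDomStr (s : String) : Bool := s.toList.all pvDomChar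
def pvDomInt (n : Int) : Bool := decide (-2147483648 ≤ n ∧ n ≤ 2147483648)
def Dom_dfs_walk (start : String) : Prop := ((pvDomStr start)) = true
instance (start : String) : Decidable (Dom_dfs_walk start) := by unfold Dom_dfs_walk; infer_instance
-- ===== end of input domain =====

-- B replaces A's explicit-stack loop by a recursive visit helper (forward neighbor order); same result, simpler shape.

-- the module-level constant `world` (literal dict, distinct keys)
def pvWorld : PySem.Dict String (List String) :=
  PySem.Dict.mk
  [("Entrance", ["Hall", "Kitchen"]),
   ("Hall", ["Armory", "Garden"]),
   ("Kitchen", ["Pantry"]),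
   ("Pantry", []),
   ("Armory", ["Boss"]),
   ("Garden", ["Boss"]),
   ("Boss", [])]

-- rank, used only for termination: every neighbor has strictly smaller rank (the fixed world is a DAG)
def pvRank (s : String) : Nat :=
  if s = "Entrance" then 4
  else if s = "Hall" then 3
  else if s = "Kitchen" ∨ s = "Armory" ∨ s = "Garden" then 2
  else if s = "Pantry" ∨ s = "Boss" then 1
  else 0

theorem pvWorld_getD_cases (node : String) :
    PySem.Dict.getD pvWorld node [] =
      (if node = "Entrance" then ["Hall", "Kitchen"]
       else if node = "Hall" then ["Armory", "Garden"]
       else if node = "Kitchen" then ["Pantry"]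
       else if node = "Pantry" then []
       else if node = "Armory" then ["Boss"]
       else if node = "Garden" then ["Boss"]
       else if node = "Boss" then []
       else []) := by
  simp only [pvWorld, PySem.Dict.getD_eq_get?_getD, PySem.Dict.get?_mk_cons]
  split_ifs <;> simp_all
  rfl

theorem pvRank_lt (node nxt : String) (h : nxt ∈ PySem.Dict.getD pvWorld node []) :
    pvRank nxt < pvRank node := by
  rw [pvWorld_getD_cases] at h
  split_ifs at h with h1 h2 h3 h4 h5 h6 h7
  · simp only [List.mem_cons, List.not_mem_nil, or_false] at h
    rcases h with rfl | rfl <;> subst h1 <;> decide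
  · simp only [List.mem_cons, List.not_mem_nil, or_false] at h
    rcases h with rfl | rfl <;> subst h2 <;> decide
  · simp only [List.mem_cons, List.not_mem_nil, or_false] at h
    subst h h3; decide
  · exact absurd h (List.not_mem_nil)
  · simp only [List.mem_cons, List.not_mem_nil, or_false] at h
    subst h h5; decide
  · simp only [List.mem_cons, List.not_mem_nil, or_false] at h
    subst h h6; decide
  · exact absurd h (List.not_mem_nil)
  · exact absurd h (List.not_mem_nil)

-- measure for A's while loop: each iteration strictly decreases it
def pvMeasure (stack : List (String × List String)) : Nat :=
  (stack.map (fun p => 3 ^ pvRank p.1)).sum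

theorem pvNeighbors_lt (node : String) :
    ((PySem.Dict.getD pvWorld node []).map (fun n => 3 ^ pvRank n)).sum < 3 ^ pvRank node := by
  rw [pvWorld_getD_cases]
  split_ifs <;> simp_all [pvRank]

-- ===== PORT A =====
-- Python's stack has its top at the END (append/pop); the port keeps the top at the HEAD, so
-- `stack.pop()` matches on the head, and appending reversed(neighbors) is prepending the
-- neighbors in forward order. `list(path)` is the identity on immutable Lean lists.
def dfs_walkLoop (stack : List (String × List String))
    (visited : List (String × List String)) (seen : PySem.Set String) :
    List (String × List String) :=
  match stack with
  | [] => visited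
  | (node, path) :: rest =>
    if PySem.Set.contains seen node then
      dfs_walkLoop rest visited seen
    else
      dfs_walkLoop
        (((PySem.Dict.getD pvWorld node []).map (fun nxt => (nxt, path ++ [nxt]))) ++ rest)
        (visited ++ [(node, path)]) (PySem.Set.add seen node)
termination_by pvMeasure stack
decreasing_by
  · have hp : 0 < 3 ^ pvRank node := pow_pos (by norm_num) _
    simp only [pvMeasure, List.map_cons, List.sum_cons]
    omega
  · have hlt := pvNeighbors_lt node
    have hm : ((((PySem.Dict.getD pvWorld node []).map (fun nxt => (nxt, path ++ [nxt]))).map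
        (fun p => 3 ^ pvRank p.1)).sum) =
        ((PySem.Dict.getD pvWorld node []).map (fun n => 3 ^ pvRank n)).sum := by
      rw [List.map_map]; rfl
    simp only [pvMeasure, List.map_append, List.sum_append, List.map_cons, List.sum_cons]
    omega

def dfs_walk (start : String) : List (String × List String) :=
  dfs_walkLoop [(start, [start])] [] PySem.Set.empty

-- ===== PORT B =====
-- recursive DFS: visit threads (visited, seen) as an accumulator; neighbors in forward order
def dfs_walkVisit (node : String) (path : List String)
    (acc : List (String × List String) × PySem.Set String) :
    List (String × List String) × PySem.Set String :=
  if PySem.Set.contains acc.2 node then acc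
  else
    (PySem.Dict.getD pvWorld node []).attach.foldl
      (fun a nxt => dfs_walkVisit nxt.1 (path ++ [nxt.1]) a)
      (acc.1 ++ [(node, path)], PySem.Set.add acc.2 node)
termination_by pvRank node
decreasing_by exact pvRank_lt node nxt.1 nxt.2

def dfs_walk_alt (start : String) : List (String × List String) :=
  (dfs_walkVisit start [start] ([], PySem.Set.empty)).1

-- ===== PRECONDITION & SPEC =====
def Spec_dfs_walk (start : String) (out : List (String × List String)) : Prop := out = dfs_walk_alt start
instance (start : String) (out : List (String × List String)) : Decidable (Spec_dfs_walk start out) := by unfold Spec_dfs_walk; infer_instance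

-- ===== CLAIM (what is proved, stated in full; the proofs are below) =====
def Claim_equal_dfs_walk : Prop := ∀ (start : String), Dom_dfs_walk start → Spec_dfs_walk start (dfs_walk start)

-- ===== LEMMAS AND PROOFS =====

-- key invariant: the iterative loop over any stack equals folding the recursive visit over its entries
theorem pv_loop_eq_fold : ∀ (n : Nat) (stack : List (String × List String))
    (visited : List (String × List String)) (seen : PySem.Set String),
    pvMeasure stack ≤ n →
    dfs_walkLoop stack visited seen =
      (stack.foldl (fun a p => dfs_walkVisit p.1 p.2 a) (visited, seen)).1 := by
  intro n
  induction n with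
  | zero =>
    intro stack visited seen h
    match stack with
    | [] => rw [dfs_walkLoop]; rfl
    | (node, path) :: rest =>
      exfalso
      have hp : 0 < 3 ^ pvRank node := pow_pos (by norm_num) _
      simp only [pvMeasure, List.map_cons, List.sum_cons, Nat.le_zero] at h
      omega
  | succ n ih =>
    intro stack visited seen h
    match stack with
    | [] => rw [dfs_walkLoop]; rfl
    | (node, path) :: rest =>
      rw [dfs_walkLoop, List.foldl_cons]
      by_cases hs : PySem.Set.contains seen node
      · rw [if_pos hs]
        rw [dfs_walkVisit, if_pos hs]
        apply ih
        have hp : 0 < 3 ^ pvRank node := pow_pos (by norm_num) _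
        simp only [pvMeasure, List.map_cons, List.sum_cons] at h ⊢
        omega
      · rw [if_neg hs]
        have hlt := pvNeighbors_lt node
        have hm : pvMeasure (((PySem.Dict.getD pvWorld node []).map
            (fun nxt => (nxt, path ++ [nxt]))) ++ rest) =
            ((PySem.Dict.getD pvWorld node []).map (fun n => 3 ^ pvRank n)).sum +
            pvMeasure rest := by
          simp only [pvMeasure, List.map_append, List.sum_append, List.map_map]; rfl
        have h' : 3 ^ pvRank node + pvMeasure rest ≤ n + 1 := by
          simpa [pvMeasure] using h
        rw [ih _ _ _ (by rw [hm]; simp only [pvMeasure] at *; omega)]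
        rw [dfs_walkVisit, if_neg hs]
        dsimp only
        rw [List.foldl_append, List.foldl_attach (f := fun a nxt => dfs_walkVisit nxt (path ++ [nxt]) a), List.foldl_map]

-- ===== VERDICT (by name: the statement is the Claim_ definition above) =====
theorem dfs_walk_spec : Claim_equal_dfs_walk := by
  intro start _
  unfold Spec_dfs_walk dfs_walk dfs_walk_alt
  rw [pv_loop_eq_fold (pvMeasure [(start, [start])]) _ _ _ (le_refl _)]
  rfl
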